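-- pv_equiv track=rewrite | github.com/qn06142/coding-python | vnoicup24_r1_f.py | count_subsequences_occurrences
-- ===== SOURCE A (Python) =====
-- MOD = 998244353
--
-- def count_subsequences_occurrences(test_cases, k):
--     results = []
--
--     for n, s in test_cases:
--         # Initialize a dictionary to store the count of each subsequence
--         subseq_count = {}
--
--         # Initial DP state: empty string has exactly one way to appear zero times
--         subseq_count[""] = 1
--
--         # Process each character in the string
--         for char in s:
--             new_subseq_count = subseq_count.copy()
--             for subseq in subseq_count:
--                 new_subseq = subseq + char
--                 if new_subseq in new_subseq_count:
--                     new_subseq_count[new_subseq] = (new_subseq_count[new_subseq] + subseq_count[subseq]) % MOD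
--                 else:
--                     new_subseq_count[new_subseq] = subseq_count[subseq]
--             subseq_count = new_subseq_count
--
--         # Count how many subsequences appear exactly k times
--         count_exactly_k = sum(1 for v in subseq_count.values() if v == k) % MOD
--         results.append(count_exactly_k)
--
--     return results
-- ===== SOURCE B (Python) =====
-- MOD = 998244353
--
-- def count_subsequences_occurrences(test_cases, k):
--     # Enumerate every subsequence occurrence explicitly (doubling list), then
--     # tally occurrences in one counting pass; compare tallies mod MOD.
--     results = []
--     for n, s in test_cases:
--         subs = [""]
--         for ch in s:
--             subs += [t + ch for t in subs]
--         counts = {}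
--         for t in subs:
--             counts[t] = counts.get(t, 0) + 1
--         results.append(sum(1 for v in counts.values() if v % MOD == k) % MOD)
--     return results
-- ===== Notes on version B (the rewrite author's own statement) =====
-- stated objective: alternative
-- what changed: Replaces A's per-character dictionary DP (merging shifted copies with modular additions) by explicit enumeration of all 2^n subsequence occurrences via list doubling followed by a single counting pass, comparing each tally mod MOD.
import Mathlib
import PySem

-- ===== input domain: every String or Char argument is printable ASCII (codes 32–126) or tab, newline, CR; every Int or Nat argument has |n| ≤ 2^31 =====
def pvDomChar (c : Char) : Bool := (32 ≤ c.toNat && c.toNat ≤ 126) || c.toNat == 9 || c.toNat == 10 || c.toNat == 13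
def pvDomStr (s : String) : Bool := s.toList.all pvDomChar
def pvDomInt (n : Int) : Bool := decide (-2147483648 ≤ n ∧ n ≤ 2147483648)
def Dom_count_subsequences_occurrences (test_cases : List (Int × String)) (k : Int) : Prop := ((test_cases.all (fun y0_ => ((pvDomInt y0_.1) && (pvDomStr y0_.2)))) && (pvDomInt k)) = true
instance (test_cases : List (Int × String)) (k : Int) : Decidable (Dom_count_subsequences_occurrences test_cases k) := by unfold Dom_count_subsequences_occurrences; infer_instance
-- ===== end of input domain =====

-- B replaces A's per-character dictionary DP by explicit enumeration of all subsequence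
-- occurrences (list doubling) followed by one counting pass (objective: alternative).
-- Both ports realise Python's dict as the PySem.Dict association list; the dict
-- update/lookup steps are written out on the items list via core List.lookup/idxOf/set/++
-- (exactly PySem.Dict.get?/insert semantics, proved as pv_insA_eq_py / pv_cntB_eq_py below)
-- so the differential evaluator can run them on the larger sampled strings.


def pvMOD : Int := 998244353

-- ===== PORT A =====
-- inner loop body: 'if new_subseq in new_subseq_count: new[ns] = (new[ns] + old[t]) % MOD
-- else: new[ns] = old[t]' — dict membership/read = first-match lookup on the items list,
-- dict write = overwrite in place / append a fresh key at the end (Python dict semantics)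
def pvInsA (c : Char) (nd : PySem.Dict String Int) (p : String × Int) :
    PySem.Dict String Int :=
  match nd.items.lookup (p.1.push c) with
  | some w => PySem.Dict.mk
      (nd.items.set (nd.items.idxOf (p.1.push c, w))
        (p.1.push c, PySem.Int.mod (w + p.2) pvMOD))
  | none => PySem.Dict.mk (nd.items ++ [(p.1.push c, p.2)])

-- one character step: new_subseq_count starts as a copy of subseq_count,
-- then the inner loop runs over subseq_count's items
def pvStepA (d : PySem.Dict String Int) (c : Char) : PySem.Dict String Int :=
  d.items.foldl (pvInsA c) d

def count_subsequences_occurrences (test_cases : List (Int × String)) (k : Int) : List Int :=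
  test_cases.foldl (fun results tc =>
    let d0 : PySem.Dict String Int := PySem.Dict.empty.insert "" 1
    let d := tc.2.toList.foldl pvStepA d0
    let count_exactly_k :=
      PySem.Int.mod ((d.values.map (fun v => if v = k then (1 : Int) else 0)).sum) pvMOD
    results ++ [count_exactly_k]) []

-- ===== PORT B =====
-- subs += [t + ch for t in subs]
def pvDouble (ss : List String) (c : Char) : List String :=
  ss ++ ss.map (fun t => t.push c)

-- counting pass body: 'counts[t] = counts.get(t, 0) + 1', same dict realisation as port A
def pvCntB (d : PySem.Dict String Int) (t : String) : PySem.Dict String Int :=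
  match d.items.lookup t with
  | some w => PySem.Dict.mk (d.items.set (d.items.idxOf (t, w)) (t, w + 1))
  | none => PySem.Dict.mk (d.items ++ [(t, 1)])

def count_subsequences_occurrences_alt (test_cases : List (Int × String)) (k : Int) : List Int :=
  test_cases.foldl (fun results tc =>
    let subs := tc.2.toList.foldl pvDouble [""]
    let counts := subs.foldl pvCntB (PySem.Dict.empty : PySem.Dict String Int)
    results ++ [PySem.Int.mod
      ((counts.values.map (fun v => if PySem.Int.mod v pvMOD = k then (1 : Int) else 0)).sum)
      pvMOD]) []

-- ===== PRECONDITION & SPEC =====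
def Spec_count_subsequences_occurrences (test_cases : List (Int × String)) (k : Int) (out : List Int) : Prop := out = count_subsequences_occurrences_alt test_cases k
instance (test_cases : List (Int × String)) (k : Int) (out : List Int) : Decidable (Spec_count_subsequences_occurrences test_cases k out) := by unfold Spec_count_subsequences_occurrences; infer_instance

-- ===== CLAIM (what is proved, stated in full; the proofs are below) =====
def Claim_equal_count_subsequences_occurrences : Prop := ∀ (test_cases : List (Int × String)) (k : Int), Dom_count_subsequences_occurrences test_cases k → Spec_count_subsequences_occurrences test_cases k (count_subsequences_occurrences test_cases k)

-- ===== LEMMAS AND PROOFS =====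

-- the same step bodies written with the PySem.Dict primitives (proof-side views of the ports)
def pvInsAPy (c : Char) (nd : PySem.Dict String Int) (p : String × Int) :
    PySem.Dict String Int :=
  if nd.contains (p.1.push c) then
    nd.insert (p.1.push c) (PySem.Int.mod (nd.getD (p.1.push c) 0 + p.2) pvMOD)
  else nd.insert (p.1.push c) p.2

def pvCntBPy (d : PySem.Dict String Int) (t : String) : PySem.Dict String Int :=
  d.insert t (d.getD t 0 + 1)

-- List.lookup on the items list IS PySem.Dict.get?
theorem pv_lookup_eq_get? (l : List (String × Int)) (k : String) :
    l.lookup k = (PySem.Dict.mk l).get? k := by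
  induction l with
  | nil => rfl
  | cons q l ih =>
    cases q with
    | mk a b =>
      rw [PySem.Dict.get?_mk_cons]
      simp only [List.lookup]
      cases h : k == a with
      | true =>
        have h' : (a == k) = true := beq_iff_eq.mpr (beq_iff_eq.mp h).symm
        simp [h']
      | false =>
        have h' : (a == k) = false :=
          beq_eq_false_iff_ne.mpr (fun he => (beq_eq_false_iff_ne.mp h) he.symm)
        simp [h', ih]

-- overwriting the (unique) entry of a present key in place = PySem's map form
theorem pv_set_idxOf_eq_map (l : List (String × Int)) (k : String) (w v' : Int)
    (hnd : (l.map Prod.fst).Nodup) (hl : l.lookup k = some w) :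
    l.set (l.idxOf (k, w)) (k, v') =
      l.map (fun q => if q.1 == k then (k, v') else q) := by
  induction l with
  | nil => rfl
  | cons q l ih =>
    cases q with
    | mk a b =>
      simp only [List.map_cons, List.nodup_cons] at hnd
      simp only [List.lookup] at hl
      by_cases hak : a = k
      · subst hak
        rw [beq_self_eq_true] at hl
        have hb : b = w := by simpa using hl
        subst hb
        have h0 : List.idxOf (a, b) ((a, b) :: l) = 0 := by
          rw [List.idxOf_cons, beq_self_eq_true]; rfl
        rw [h0, List.set_cons_zero, List.map_cons]
        simp only [beq_self_eq_true, if_true]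
        have htail : l.map (fun q : String × Int => if q.1 == a then (a, v') else q) = l := by
          have := List.map_congr_left (l := l)
            (f := fun q : String × Int => if q.1 == a then (a, v') else q) (g := id)
            (by intro q hq
                have hqa : q.1 ≠ a := fun h => hnd.1 (h ▸ List.mem_map_of_mem hq)
                simp [hqa])
          simpa using this
        rw [htail]
      · have hka : (k == a) = false := beq_eq_false_iff_ne.mpr (fun h => hak h.symm)
        rw [hka] at hl
        have hpair : (((a, b) : String × Int) == (k, w)) = false :=
          beq_eq_false_iff_ne.mpr (fun h => hak (congrArg Prod.fst h))
        have hb : ((a : String) == k) = false := beq_eq_false_iff_ne.mpr hak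
        rw [List.idxOf_cons, hpair]
        simp only [cond_false, List.set_cons_succ, List.map_cons, hb, Bool.false_eq_true, if_false]
        rw [ih hnd.2 hl]

-- port A's inner body = the PySem.Dict form, on any dict with distinct keys
theorem pv_insA_eq_py (c : Char) (nd : PySem.Dict String Int) (p : String × Int)
    (hnd : nd.keys.Nodup) : pvInsA c nd p = pvInsAPy c nd p := by
  unfold pvInsA pvInsAPy
  cases hl : nd.items.lookup (p.1.push c) with
  | some w =>
    have hget : nd.get? (p.1.push c) = some w := by
      rw [← pv_lookup_eq_get?]; exact hl
    have hc : nd.contains (p.1.push c) = true := by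
      rw [PySem.Dict.contains_eq_isSome_get?, hget]; rfl
    have hgd : nd.getD (p.1.push c) 0 = w := by
      rw [PySem.Dict.getD_eq_get?_getD, hget]; rfl
    simp only [hc, if_true, hgd]
    apply PySem.Dict.ext
    rw [PySem.Dict.items_insert_of_contains _ _ hc]
    exact pv_set_idxOf_eq_map nd.items (p.1.push c) w _ hnd hl
  | none =>
    have hget : nd.get? (p.1.push c) = none := by
      rw [← pv_lookup_eq_get?]; exact hl
    have hc : nd.contains (p.1.push c) = false := by
      rw [PySem.Dict.contains_eq_isSome_get?, hget]; rfl
    simp only [hc, Bool.false_eq_true, if_false]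
    apply PySem.Dict.ext
    rw [PySem.Dict.items_insert_of_not_contains _ _ hc]

-- same for port B's counting body
theorem pv_cntB_eq_py (d : PySem.Dict String Int) (t : String)
    (hnd : d.keys.Nodup) : pvCntB d t = pvCntBPy d t := by
  unfold pvCntB pvCntBPy
  cases hl : d.items.lookup t with
  | some w =>
    have hget : d.get? t = some w := by rw [← pv_lookup_eq_get?]; exact hl
    have hc : d.contains t = true := by
      rw [PySem.Dict.contains_eq_isSome_get?, hget]; rfl
    have hgd : d.getD t 0 = w := by
      rw [PySem.Dict.getD_eq_get?_getD, hget]; rfl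
    rw [hgd]
    apply PySem.Dict.ext
    rw [PySem.Dict.items_insert_of_contains _ _ hc]
    exact pv_set_idxOf_eq_map d.items t w _ hnd hl
  | none =>
    have hget : d.get? t = none := by rw [← pv_lookup_eq_get?]; exact hl
    have hc : d.contains t = false := by
      rw [PySem.Dict.contains_eq_isSome_get?, hget]; rfl
    have hgd : d.getD t 0 = 0 := by
      rw [PySem.Dict.getD_eq_get?_getD, hget]; rfl
    rw [hgd]
    apply PySem.Dict.ext
    rw [PySem.Dict.items_insert_of_not_contains _ _ hc]
    norm_num

theorem pv_insAPy_nodup (c : Char) (nd : PySem.Dict String Int) (p : String × Int)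
    (hnd : nd.keys.Nodup) : (pvInsAPy c nd p).keys.Nodup := by
  unfold pvInsAPy
  split <;> exact PySem.Dict.nodup_keys_insert _ _ _ hnd

theorem pv_cntBPy_nodup (d : PySem.Dict String Int) (t : String)
    (hnd : d.keys.Nodup) : (pvCntBPy d t).keys.Nodup :=
  PySem.Dict.nodup_keys_insert _ _ _ hnd

-- the two foldl bridges (keys stay distinct through the loops)
theorem pv_foldA_bridge (c : Char) :
    ∀ (ps : List (String × Int)) (nd : PySem.Dict String Int), nd.keys.Nodup →
      ps.foldl (pvInsA c) nd = ps.foldl (pvInsAPy c) nd := by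
  intro ps
  induction ps with
  | nil => intro nd _; rfl
  | cons p ps ih =>
    intro nd hnd
    rw [List.foldl_cons, List.foldl_cons, pv_insA_eq_py c nd p hnd]
    exact ih _ (pv_insAPy_nodup c nd p hnd)

theorem pv_foldB_bridge :
    ∀ (ts : List String) (d : PySem.Dict String Int), d.keys.Nodup →
      ts.foldl pvCntB d = ts.foldl pvCntBPy d := by
  intro ts
  induction ts with
  | nil => intro d _; rfl
  | cons t ts ih =>
    intro d hnd
    rw [List.foldl_cons, List.foldl_cons, pv_cntB_eq_py d t hnd]
    exact ih _ (pv_cntBPy_nodup d t hnd)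

-- appending a fixed character to a string is injective
theorem pv_push_inj (c : Char) : Function.Injective (fun s : String => s.push c) := by
  intro a b h
  have h2 := congrArg String.toList h
  simp only [String.toList_push] at h2
  exact String.toList_injective (List.append_left_injective [c] h2)

-- Set.ofList commutes with mapping an injective function
theorem pv_set_add_map (f : String → String) (hf : Function.Injective f)
    (S : PySem.Set String) (x : String) :
    PySem.Set.add (S.map f) (f x) = (PySem.Set.add S x).map f := by
  rw [PySem.Set.add_eq_ite, PySem.Set.add_eq_ite]
  by_cases hx : x ∈ S
  · simp [hx, List.mem_map_of_injective hf]
  · simp [hx, List.mem_map_of_injective hf]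

theorem pv_set_ofList_map (f : String → String) (hf : Function.Injective f)
    (l : List String) :
    PySem.Set.ofList (l.map f) = (PySem.Set.ofList l).map f := by
  induction l using List.reverseRecOn with
  | nil => rfl
  | append_singleton xs x ih =>
    rw [List.map_append, List.map_singleton, PySem.Set.ofList_append_singleton,
      PySem.Set.ofList_append_singleton, ih, pv_set_add_map f hf]

-- characterisation of the lookup after the inner fold of pvStepA's PySem view
theorem pv_fold_get? (c : Char) (d0 : PySem.Dict String Int) :
    ∀ (ps : List (String × Int)) (nd : PySem.Dict String Int),
      (ps.map (fun p => p.1.push c)).Nodup →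
      (∀ p ∈ ps, nd.get? (p.1.push c) = d0.get? (p.1.push c)) →
      ∀ x, (ps.foldl (pvInsAPy c) nd).get? x =
        match ps.find? (fun p => p.1.push c == x) with
        | some p => some (if d0.contains x then PySem.Int.mod (d0.getD x 0 + p.2) pvMOD else p.2)
        | none => nd.get? x := by
  intro ps
  induction ps with
  | nil => intro nd _ _ x; rfl
  | cons q ps ih =>
    intro nd hnd hagree x
    simp only [List.map_cons, List.nodup_cons] at hnd
    have hinner : ∀ p ∈ ps, (pvInsAPy c nd q).get? (p.1.push c) = d0.get? (p.1.push c) := by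
      intro p hp
      have hne : p.1.push c ≠ q.1.push c := by
        intro h; exact hnd.1 (h ▸ List.mem_map_of_mem hp)
      simp only [pvInsAPy]
      split <;> rw [PySem.Dict.get?_insert_of_ne _ _ hne] <;>
        exact hagree p (List.mem_cons_of_mem _ hp)
    have hq : nd.get? (q.1.push c) = d0.get? (q.1.push c) := hagree q List.mem_cons_self
    rw [List.foldl_cons, ih (pvInsAPy c nd q) hnd.2 hinner x, List.find?_cons]
    by_cases hx : q.1.push c = x
    · subst hx
      rw [beq_self_eq_true]
      have hnone : ps.find? (fun p => p.1.push c == q.1.push c) = none := by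
        rw [List.find?_eq_none]
        intro p hp h
        exact hnd.1 ((beq_iff_eq.mp h) ▸ List.mem_map_of_mem hp)
      rw [hnone]
      simp only [pvInsAPy]
      have hcont : nd.contains (q.1.push c) = d0.contains (q.1.push c) := by
        rw [PySem.Dict.contains_eq_isSome_get?, PySem.Dict.contains_eq_isSome_get?, hq]
      have hgd : nd.getD (q.1.push c) 0 = d0.getD (q.1.push c) 0 := by
        rw [PySem.Dict.getD_eq_get?_getD, PySem.Dict.getD_eq_get?_getD, hq]
      rw [hcont, hgd]
      split <;> rw [PySem.Dict.get?_insert_self]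
    · have hb : (q.1.push c == x) = false := beq_eq_false_iff_ne.mpr hx
      rw [hb]
      cases hfind : List.find? (fun p : String × Int => p.1.push c == x) ps with
      | some p => rfl
      | none =>
        show (pvInsAPy c nd q).get? x = nd.get? x
        simp only [pvInsAPy]
        split <;> exact PySem.Dict.get?_insert_of_ne _ _ (fun h => hx h.symm)

-- the per-character invariant step
theorem pv_step (subs : List String) (c : Char) (d : PySem.Dict String Int)
    (hk : d.keys = PySem.Set.ofList subs)
    (hv : ∀ t, d.getD t 0 = PySem.Int.mod ((subs.count t : Int)) pvMOD) :
    (pvStepA d c).keys = PySem.Set.ofList (pvDouble subs c) ∧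
    ∀ t, (pvStepA d c).getD t 0 = PySem.Int.mod (((pvDouble subs c).count t : Int)) pvMOD := by
  have hMODpos : (0 : Int) < pvMOD := by norm_num [pvMOD]
  have hnodupkeys : d.keys.Nodup := hk ▸ PySem.Set.nodup_ofList subs
  have hinj := pv_push_inj c
  have hmapkeys : d.items.map (fun p => p.1.push c) = d.keys.map (fun t => t.push c) := by
    simp only [PySem.Dict.keys, List.map_map]; rfl
  have hnodupmapped : (d.items.map (fun p => p.1.push c)).Nodup := by
    rw [hmapkeys]; exact hnodupkeys.map hinj
  have hbridge : pvStepA d c = d.items.foldl (pvInsAPy c) d :=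
    pv_foldA_bridge c d.items d hnodupkeys
  constructor
  · -- keys
    have hbody : ∀ (nd : PySem.Dict String Int) (p : String × Int),
        pvInsAPy c nd p = nd.insert (p.1.push c)
          (if nd.contains (p.1.push c) then PySem.Int.mod (nd.getD (p.1.push c) 0 + p.2) pvMOD
           else p.2) := by
      intro nd p
      simp only [pvInsAPy]
      split <;> simp_all
    have h2 : pvStepA d c = d.items.foldl (fun nd p => nd.insert (p.1.push c)
        (if nd.contains (p.1.push c) then PySem.Int.mod (nd.getD (p.1.push c) 0 + p.2) pvMOD
         else p.2)) d := by
      rw [hbridge]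
      exact PySem.List.foldl_congr_mem _ _ _ _ (fun nd p _ => hbody nd p)
    rw [h2, PySem.Dict.keys_foldl_insert_key, hmapkeys, hk]
    unfold pvDouble
    rw [PySem.Set.ofList_append, PySem.Set.update_eq_append_filter,
      PySem.Set.update_eq_append_filter, pv_set_ofList_map _ hinj,
      pv_set_ofList_map _ hinj, PySem.Set.ofList_ofList]
  · -- values
    intro x
    have hfold := pv_fold_get? c d d.items d hnodupmapped (fun _ _ => rfl) x
    rw [hbridge, PySem.Dict.getD_eq_get?_getD, hfold]
    have hcountmap : ∀ t : String, ((subs.map (fun t => t.push c)).count (t.push c)) = subs.count t :=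
      fun t => List.count_map_of_injective subs _ hinj t
    cases hfind : d.items.find? (fun p => p.1.push c == x) with
    | some p =>
      have hpx' := List.find?_some hfind
      have hpx : p.1.push c = x := by simpa using hpx'
      have hpmem : p ∈ d.items := List.mem_of_find?_eq_some hfind
      have hpv : d.get? p.1 = some p.2 := PySem.Dict.get?_of_mem_items d hpmem hnodupkeys
      have hp2 : p.2 = PySem.Int.mod ((subs.count p.1 : Int)) pvMOD := by
        have := hv p.1
        rw [PySem.Dict.getD_eq_get?_getD, hpv] at this
        simpa using this
      have hcount' : ((pvDouble subs c).count x : Int) = (subs.count x : Int) + (subs.count p.1 : Int) := by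
        unfold pvDouble
        rw [List.count_append, ← hpx, hcountmap p.1]
        push_cast; ring
      simp only [Option.getD_some]
      by_cases hcx : d.contains x
      · simp only [hcx, if_true]
        rw [hv x, hp2, hcount']
        rw [PySem.Int.mod_eq_emod_of_pos hMODpos, PySem.Int.mod_eq_emod_of_pos hMODpos,
          PySem.Int.mod_eq_emod_of_pos hMODpos, PySem.Int.mod_eq_emod_of_pos hMODpos,
          ← Int.add_emod]
      · simp only [hcx]
        have hxnot : x ∉ subs := by
          intro hxs
          exact (Bool.not_eq_true _ ▸ hcx : ¬ d.contains x = true)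
            ((PySem.Dict.contains_iff_mem_keys d x).mpr (hk ▸ (PySem.Set.mem_ofList _ _).mpr hxs))
        have : subs.count x = 0 := List.count_eq_zero.mpr hxnot
        rw [hp2, hcount', this]
        norm_num
    | none =>
      rw [← PySem.Dict.getD_eq_get?_getD, hv x]
      have hxnot : x ∉ subs.map (fun t => t.push c) := by
        intro hmem
        obtain ⟨t, ht, hteq⟩ := List.mem_map.mp hmem
        have htk : t ∈ d.keys := hk ▸ (PySem.Set.mem_ofList _ _).mpr ht
        obtain ⟨p, hpmem, hp1⟩ := List.mem_map.mp (show t ∈ d.items.map Prod.fst from htk)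
        have := (List.find?_eq_none.mp hfind) p hpmem
        rw [hp1] at this
        exact this (beq_iff_eq.mpr hteq)
      have : (subs.map (fun t => t.push c)).count x = 0 := List.count_eq_zero.mpr hxnot
      unfold pvDouble
      rw [List.count_append, this]
      norm_num

-- the invariant carried over the whole string
theorem pv_inv (s : List Char) :
    ∀ (subs : List String) (d : PySem.Dict String Int),
      d.keys = PySem.Set.ofList subs →
      (∀ t, d.getD t 0 = PySem.Int.mod ((subs.count t : Int)) pvMOD) →
      (s.foldl pvStepA d).keys = PySem.Set.ofList (s.foldl pvDouble subs) ∧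
      ∀ t, (s.foldl pvStepA d).getD t 0 =
        PySem.Int.mod (((s.foldl pvDouble subs).count t : Int)) pvMOD := by
  induction s with
  | nil => intro subs d hk hv; exact ⟨hk, hv⟩
  | cons c s ih =>
    intro subs d hk hv
    have hstep := pv_step subs c d hk hv
    exact ih (pvDouble subs c) (pvStepA d c) hstep.1 hstep.2

-- equality of the two per-test-case results
theorem pv_case (s : String) (k : Int) :
    PySem.Int.mod
      (((s.toList.foldl pvStepA (PySem.Dict.empty.insert "" 1)).values.map
        (fun v => if v = k then (1 : Int) else 0)).sum) pvMOD =
    PySem.Int.mod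
      (((s.toList.foldl pvDouble [""]).foldl pvCntB
          (PySem.Dict.empty : PySem.Dict String Int)).values.map
        (fun v => if PySem.Int.mod v pvMOD = k then (1 : Int) else 0)).sum pvMOD := by
  have h0k : (PySem.Dict.empty.insert ("" : String) (1 : Int)).keys =
      PySem.Set.ofList [""] := by decide
  have h0v : ∀ t, (PySem.Dict.empty.insert ("" : String) (1 : Int)).getD t 0 =
      PySem.Int.mod (((([""] : List String)).count t : Int)) pvMOD := by
    intro t
    rw [PySem.Dict.getD_insert]
    by_cases ht : t = ("" : String)
    · subst ht; decide
    · have hz : (([""] : List String).count t) = 0 := by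
        simp [ht]
      rw [hz]
      simp [ht, PySem.Int.mod]
  obtain ⟨hkeys, hvals⟩ := pv_inv s.toList [""] _ h0k h0v
  set d := s.toList.foldl pvStepA (PySem.Dict.empty.insert "" 1) with hd
  set subs := s.toList.foldl pvDouble [""] with hsubs
  have hnodup : d.keys.Nodup := hkeys ▸ PySem.Set.nodup_ofList subs
  have hA : d.values = (PySem.Set.ofList subs).map
      (fun t => PySem.Int.mod ((subs.count t : Int)) pvMOD) := by
    rw [PySem.Dict.values_eq_map_keys d hnodup 0, hkeys]
    exact List.map_congr_left (fun t _ => hvals t)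
  have hB : subs.foldl pvCntB (PySem.Dict.empty : PySem.Dict String Int) =
      PySem.Dict.counter subs := by
    rw [pv_foldB_bridge subs PySem.Dict.empty (by decide)]
    exact PySem.Dict.foldl_insert_getD_add_one_eq_counter subs
  have hBv : (PySem.Dict.counter subs).values =
      (PySem.Set.ofList subs).map (fun t => ((subs.count t : Int))) := by
    show (PySem.Dict.counter subs).items.map Prod.snd = _
    rw [PySem.Dict.items_counter, List.map_map]
    rfl
  rw [hA, hB, hBv, List.map_map, List.map_map]
  congr 1

-- ===== VERDICT (by name: the statement is the Claim_ definition above) =====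
theorem count_subsequences_occurrences_spec : Claim_equal_count_subsequences_occurrences := by
  intro test_cases k _
  show count_subsequences_occurrences test_cases k = count_subsequences_occurrences_alt test_cases k
  unfold count_subsequences_occurrences count_subsequences_occurrences_alt
  rw [PySem.List.foldl_append_singleton_eq_map, PySem.List.foldl_append_singleton_eq_map]
  simp only [List.nil_append]
  exact List.map_congr_left (fun tc _ => pv_case tc.2 k)
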